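-- pv_equiv track=rewrite | github.com/KillianRando/bbchallenge-py | bbchallenge/main.py | tape_to_str
-- ===== SOURCE A (Python) =====
-- def tape_to_str(tape, pos, tape_head):
--     min_pos = min(tape.keys())
--     max_pos = max(tape.keys())
--     s = ""
--     for i in range(min_pos,max_pos+1):
--         if i == pos and tape_head == '>':
--             s += ">"
--         s += "." if tape[i] == 0 else "#"
--         if i == pos and tape_head == '<':
--             s += "<"
--     return s
-- ===== SOURCE B (Python) =====
-- def tape_to_str(tape, pos, tape_head):
--     mn = min(tape)
--     width = max(tape) - mn + 1
--     cells = [None] * width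
--     for k, v in tape.items():
--         cells[k - mn] = '.' if v == 0 else '#'
--     if tape_head == '>':
--         idx = pos - mn
--         if 0 <= idx < width:
--             cells.insert(idx, '>')
--     elif tape_head == '<':
--         idx = pos - mn
--         if 0 <= idx < width:
--             cells.insert(idx + 1, '<')
--     return ''.join(cells)
-- ===== Notes on version B (the rewrite author's own statement) =====
-- stated objective: alternative
-- what changed: B inverts the traversal: instead of A's walk over range(min,max) with a dict lookup per cell, it scatters each dict item into a pre-allocated buffer at offset key-min, splices the head marker in with list.insert, and joins once; Pre_ also excludes association lists with duplicate keys, which do not represent a Python dict.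
import Mathlib
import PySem

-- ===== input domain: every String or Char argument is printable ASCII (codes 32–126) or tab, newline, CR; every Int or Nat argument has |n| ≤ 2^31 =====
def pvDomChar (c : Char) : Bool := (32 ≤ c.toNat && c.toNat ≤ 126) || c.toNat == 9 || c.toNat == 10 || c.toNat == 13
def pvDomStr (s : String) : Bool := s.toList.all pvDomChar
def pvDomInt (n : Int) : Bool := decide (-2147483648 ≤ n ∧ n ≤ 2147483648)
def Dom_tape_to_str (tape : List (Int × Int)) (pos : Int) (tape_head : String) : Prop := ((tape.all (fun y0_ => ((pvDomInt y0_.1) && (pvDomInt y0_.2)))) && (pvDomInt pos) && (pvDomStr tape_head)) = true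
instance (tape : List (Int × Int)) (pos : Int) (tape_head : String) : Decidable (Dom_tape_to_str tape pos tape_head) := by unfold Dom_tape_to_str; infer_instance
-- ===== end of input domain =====

-- B scatters each dict item into a pre-allocated buffer at offset key-min, splices the head
-- marker in with list.insert and joins once — no range walk and no per-cell dict lookup
-- (objective: alternative algorithm; no speed claim).

-- ===== PORT A =====
def tape_to_str (tape : List (Int × Int)) (pos : Int) (tape_head : String) : String :=
  match PySem.List.min? (PySem.Dict.mk tape).keys (fun y => y),
        PySem.List.max? (PySem.Dict.mk tape).keys (fun y => y) with
  | some min_pos, some max_pos =>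
    String.ofList ((PySem.List.pyRange min_pos (max_pos + 1) 1).foldl (fun s i =>
      let s := if i = pos ∧ tape_head = ">" then s ++ ['>'] else s
      let s := s ++ (if (PySem.Dict.mk tape).getD i 0 = 0 then ['.'] else ['#'])
      if i = pos ∧ tape_head = "<" then s ++ ['<'] else s) ([] : List Char))
  | _, _ => ""   -- unreachable under Pre_ (Python raises ValueError on an empty dict)

-- ===== PORT B =====
def tape_to_str_alt (tape : List (Int × Int)) (pos : Int) (tape_head : String) : String :=
  match PySem.List.min? (PySem.Dict.mk tape).keys (fun y => y) with
  | none => ""   -- unreachable under Pre_ (Python raises ValueError on min of an empty dict)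
  | some mn =>
    match PySem.List.max? (PySem.Dict.mk tape).keys (fun y => y) with
    | none => ""   -- unreachable under Pre_
    | some mx =>
    let width : Int := mx - mn + 1
    let cells : List (Option Char) := (PySem.Dict.mk tape).items.foldl
      (fun buf kv => buf.set (kv.1 - mn).toNat (some (if kv.2 = 0 then '.' else '#')))
      (List.replicate width.toNat none)
    let cells :=
      if tape_head = ">" then
        if 0 ≤ pos - mn ∧ pos - mn < width then PySem.List.insert cells (pos - mn) (some '>') else cells
      else if tape_head = "<" then
        if 0 ≤ pos - mn ∧ pos - mn < width then PySem.List.insert cells (pos - mn + 1) (some '<') else cells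
      else cells
    -- ''.join(cells): under Pre_ every slot is filled; on a gap Python raises TypeError (outside Pre_)
    String.ofList (cells.map (fun c => c.getD '?'))

-- ===== PRECONDITION & SPEC =====
-- Pre_ excludes exactly the inputs on which A raises — the empty dict (ValueError on min of no
-- keys) and key sets that are not a contiguous integer interval (KeyError at the first gap) —
-- plus association lists with duplicate keys, which do not represent a Python dict at all.
def Pre_tape_to_str (tape : List (Int × Int)) (pos : Int) (tape_head : String) : Prop :=
  (tape.map Prod.fst).Nodup ∧ tape ≠ [] ∧
    ∀ p ∈ tape, ∀ q ∈ tape, ∀ i ∈ PySem.List.pyRange p.1 (q.1 + 1) 1, i ∈ tape.map Prod.fst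
instance (tape : List (Int × Int)) (pos : Int) (tape_head : String) : Decidable (Pre_tape_to_str tape pos tape_head) := by unfold Pre_tape_to_str; infer_instance

def pvWitness_tape_to_str : (List (Int × Int)) × Int × String := ([(0, 1), (1, 0)], 0, ">")

def Spec_tape_to_str (tape : List (Int × Int)) (pos : Int) (tape_head : String) (out : String) : Prop := out = tape_to_str_alt tape pos tape_head
instance (tape : List (Int × Int)) (pos : Int) (tape_head : String) (out : String) : Decidable (Spec_tape_to_str tape pos tape_head out) := by unfold Spec_tape_to_str; infer_instance

-- ===== CLAIM (what is proved, stated in full; the proofs are below) =====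
def Claim_equal_tape_to_str : Prop := ∀ (tape : List (Int × Int)) (pos : Int) (tape_head : String), Dom_tape_to_str tape pos tape_head → Pre_tape_to_str tape pos tape_head → Spec_tape_to_str tape pos tape_head (tape_to_str tape pos tape_head)

-- ===== LEMMAS AND PROOFS =====

-- one tape cell as A and B both print it
def pvCell (d : PySem.Dict Int Int) (i : Int) : Char := if d.getD i 0 = 0 then '.' else '#'

-- what one iteration of A's loop appends
def pvG (d : PySem.Dict Int Int) (pos : Int) (hd : String) (i : Int) : List Char :=
  (if i = pos ∧ hd = ">" then ['>'] else []) ++ [pvCell d i] ++ (if i = pos ∧ hd = "<" then ['<'] else [])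

theorem pv_fold (d : PySem.Dict Int Int) (pos : Int) (hd : String) (l : List Int) (acc : List Char) :
    l.foldl (fun s i =>
      let s := if i = pos ∧ hd = ">" then s ++ ['>'] else s
      let s := s ++ (if d.getD i 0 = 0 then ['.'] else ['#'])
      if i = pos ∧ hd = "<" then s ++ ['<'] else s) acc = acc ++ l.flatMap (pvG d pos hd) := by
  have h : (fun (s : List Char) (i : Int) =>
      let s := if i = pos ∧ hd = ">" then s ++ ['>'] else s
      let s := s ++ (if d.getD i 0 = 0 then ['.'] else ['#'])
      if i = pos ∧ hd = "<" then s ++ ['<'] else s) = (fun s i => s ++ pvG d pos hd i) := by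
    funext s i
    simp only [pvG, pvCell]
    split_ifs <;> simp
  rw [h, PySem.List.foldl_append_eq_flatMap]

theorem pv_flat_plain (d : PySem.Dict Int Int) (pos : Int) (hd : String) (l : List Int)
    (h : ∀ i ∈ l, i = pos → hd ≠ ">" ∧ hd ≠ "<") :
    l.flatMap (pvG d pos hd) = l.map (pvCell d) := by
  induction l with
  | nil => rfl
  | cons a t ih =>
    simp only [List.flatMap_cons, List.map_cons]
    rw [ih (fun i hi => h i (List.mem_cons_of_mem a hi))]
    have ha := h a (List.mem_cons_self ..)
    simp only [pvG]
    by_cases hap : a = pos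
    · obtain ⟨h1, h2⟩ := ha hap
      simp [h1, h2]
    · simp [hap]

theorem pv_split (d : PySem.Dict Int Int) (pos mn mx : Int) (hd : String)
    (h1 : mn ≤ pos) (h2 : pos ≤ mx) :
    (PySem.List.pyRange mn (mx + 1) 1).flatMap (pvG d pos hd) =
      (PySem.List.pyRange mn pos 1).map (pvCell d) ++ pvG d pos hd pos ++
      (PySem.List.pyRange (pos + 1) (mx + 1) 1).map (pvCell d) := by
  rw [PySem.List.pyRange_one_append mn pos (mx + 1) h1 (by omega),
      PySem.List.pyRange_one_cons (by omega : pos < mx + 1)]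
  simp only [List.flatMap_append, List.flatMap_cons, List.append_assoc]
  rw [pv_flat_plain d pos hd _ (fun i hi hip => by
        have := (PySem.List.mem_pyRange_one).1 hi; omega),
      pv_flat_plain d pos hd _ (fun i hi hip => by
        have := (PySem.List.mem_pyRange_one).1 hi; omega)]

theorem pv_take (d : PySem.Dict Int Int) (m mn mx : Int)
    (h1 : mn ≤ m) (h2 : m ≤ mx + 1) :
    ((PySem.List.pyRange mn (mx + 1) 1).map (pvCell d)).take (m - mn).toNat =
      (PySem.List.pyRange mn m 1).map (pvCell d) := by
  rw [PySem.List.pyRange_one_append mn m (mx + 1) h1 h2, List.map_append]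
  rw [List.take_append_of_le_length (by simp [PySem.List.length_pyRange_one])]
  rw [List.take_of_length_le (by simp [PySem.List.length_pyRange_one])]

theorem pv_drop (d : PySem.Dict Int Int) (m mn mx : Int)
    (h1 : mn ≤ m) (h2 : m ≤ mx + 1) :
    ((PySem.List.pyRange mn (mx + 1) 1).map (pvCell d)).drop (m - mn).toNat =
      (PySem.List.pyRange m (mx + 1) 1).map (pvCell d) := by
  rw [PySem.List.pyRange_one_append mn m (mx + 1) h1 h2, List.map_append]
  rw [List.drop_append_of_le_length (by simp [PySem.List.length_pyRange_one])]
  rw [List.drop_of_length_le (by simp [PySem.List.length_pyRange_one])]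
  simp

-- what the scatter loop leaves at slot j: the (unique) item whose key maps there, else the initial slot
theorem pv_scatter_getElem? (ps : List (Int × Int)) (mn : Int) (init : List (Option Char)) (j : Nat)
    (hnd : (ps.map Prod.fst).Nodup) (hlb : ∀ p ∈ ps, mn ≤ p.1) :
    (ps.foldl (fun buf kv => buf.set (kv.1 - mn).toNat
        (some (if kv.2 = 0 then '.' else '#'))) init)[j]? =
      match ps.find? (fun kv => (kv.1 - mn).toNat == j) with
      | some kv => if j < init.length then some (some (if kv.2 = 0 then '.' else '#')) else none
      | none => init[j]? := by
  induction ps generalizing init with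
  | nil => rfl
  | cons a t ih =>
    have hnd' := List.nodup_cons.1 hnd
    have hlb' : ∀ p ∈ t, mn ≤ p.1 := fun p hp => hlb p (List.mem_cons_of_mem a hp)
    by_cases hj : (a.1 - mn).toNat = j
    · have hpa : ((a.1 - mn).toNat == j) = true := by simp [hj]
      have hfind : t.find? (fun kv => (kv.1 - mn).toNat == j) = none := by
        apply List.find?_eq_none.2
        intro p hp hpj
        have hpa1 : p.1 = a.1 := by
          have h1 := hlb a (List.mem_cons_self ..)
          have h2 := hlb' p hp
          have := beq_iff_eq.1 hpj
          omega
        exact hnd'.1 (hpa1 ▸ List.mem_map_of_mem hp)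
      simp only [List.foldl_cons, List.find?_cons, hpa]
      rw [ih _ hnd'.2 hlb', hfind]
      subst hj
      by_cases hlt : (a.1 - mn).toNat < init.length
      · rw [List.getElem?_set_self hlt]
        simp [hlt]
      · rw [List.getElem?_eq_none (by simp; omega : (init.set (a.1 - mn).toNat
          (some (if a.2 = 0 then '.' else '#'))).length ≤ (a.1 - mn).toNat)]
        simp [hlt]
    · have hpa : ((a.1 - mn).toNat == j) = false := by simp [hj]
      simp only [List.foldl_cons, List.find?_cons, hpa]
      rw [ih _ hnd'.2 hlb']
      rcases hf : t.find? (fun kv => (kv.1 - mn).toNat == j) with _ | kv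
      · simp only [hf]
        exact List.getElem?_set_ne hj
      · simp only [hf, List.length_set]

-- B's scattered buffer IS the range map of cells, each slot filled (Pre_: unique contiguous keys)
theorem pv_cells (tape : List (Int × Int)) (mn mx : Int)
    (hnd : (tape.map Prod.fst).Nodup)
    (hcont : ∀ p ∈ tape, ∀ q ∈ tape, ∀ i ∈ PySem.List.pyRange p.1 (q.1 + 1) 1, i ∈ tape.map Prod.fst)
    (hmn : PySem.List.min? (PySem.Dict.mk tape).keys (fun y => y) = some mn)
    (hmx : PySem.List.max? (PySem.Dict.mk tape).keys (fun y => y) = some mx) :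
    (PySem.Dict.mk tape).items.foldl (fun buf kv => buf.set (kv.1 - mn).toNat
        (some (if kv.2 = 0 then '.' else '#'))) (List.replicate (mx - mn + 1).toNat none) =
      (PySem.List.pyRange mn (mx + 1) 1).map (fun i => some (pvCell (PySem.Dict.mk tape) i)) := by
  have hkeys : (PySem.Dict.mk tape).keys = tape.map Prod.fst := PySem.Dict.keys_mk tape
  have hitems : (PySem.Dict.mk tape).items = tape := rfl
  have hlb : ∀ p ∈ tape, mn ≤ p.1 := fun p hp =>
    PySem.List.min?_isMin hmn p.1 (hkeys ▸ List.mem_map_of_mem hp)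
  have hub : ∀ p ∈ tape, p.1 ≤ mx := fun p hp =>
    PySem.List.max?_isMax hmx p.1 (hkeys ▸ List.mem_map_of_mem hp)
  have hmnmx : mn ≤ mx := by
    have := PySem.List.min?_isMin hmn mx (PySem.List.max?_mem hmx)
    simpa using this
  apply List.ext_getElem?
  intro j
  rw [hitems, pv_scatter_getElem? tape mn _ j hnd hlb]
  simp only [List.length_replicate]
  by_cases hjw : j < (mx - mn + 1).toNat
  · have hjr : (j : Int) < mx + 1 - mn := by omega
    have hkey : mn + (j : Int) ∈ tape.map Prod.fst := by
      have hmnk : mn ∈ tape.map Prod.fst := hkeys ▸ PySem.List.min?_mem hmn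
      have hmxk : mx ∈ tape.map Prod.fst := hkeys ▸ PySem.List.max?_mem hmx
      obtain ⟨p, hp, hp1⟩ := List.mem_map.1 hmnk
      obtain ⟨q, hq, hq1⟩ := List.mem_map.1 hmxk
      exact hcont p hp q hq _ ((PySem.List.mem_pyRange_one).2 (by omega))
    obtain ⟨p0, hp0, hp01⟩ := List.mem_map.1 hkey
    have hfind : ∃ kv, tape.find? (fun kv => (kv.1 - mn).toNat == j) = some kv := by
      rcases hf : tape.find? (fun kv => (kv.1 - mn).toNat == j) with _ | kv
      · exact absurd (by simpa using List.find?_eq_none.1 hf p0 hp0)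
          (by simp; omega)
      · exact ⟨kv, hf⟩
    obtain ⟨kv, hkv⟩ := hfind
    have hkvmem : kv ∈ tape := List.mem_of_find?_eq_some hkv
    have hkvkey : kv.1 = mn + (j : Int) := by
      have := beq_iff_eq.1
        (List.find?_some (p := fun kv : Int × Int => (kv.1 - mn).toNat == j) hkv)
      have := hlb kv hkvmem
      omega
    have hval : (PySem.Dict.mk tape).getD (mn + (j : Int)) 0 = kv.2 := by
      rw [← hkvkey]
      exact PySem.Dict.getD_of_mem_items (PySem.Dict.mk tape)
        (by rw [hitems]; simpa using hkvmem) (hkeys ▸ hnd) 0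
    rw [hkv]
    simp only [hjw, if_pos]
    rw [List.getElem?_map]
    have : (PySem.List.pyRange mn (mx + 1) 1)[j]? = some (mn + (j : Int)) := by
      rw [List.getElem?_eq_getElem (by simp [PySem.List.length_pyRange_one]; omega)]
      rw [PySem.List.getElem_pyRange_one]
    rw [this]
    simp [pvCell, hval]
  · rcases hf : tape.find? (fun kv => (kv.1 - mn).toNat == j) with _ | kv
    · simp only [hf]
      rw [List.getElem?_eq_none (by simp; omega), List.getElem?_eq_none
        (by simp [PySem.List.length_pyRange_one]; omega)]
    · exfalso
      have hkvmem : kv ∈ tape := List.mem_of_find?_eq_some hf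
      have := beq_iff_eq.1
        (List.find?_some (p := fun kv : Int × Int => (kv.1 - mn).toNat == j) hf)
      have h1 := hlb kv hkvmem
      have h2 := hub kv hkvmem
      omega

theorem pv_equal (tape : List (Int × Int)) (pos : Int) (hd : String)
    (hpre : Pre_tape_to_str tape pos hd) :
    tape_to_str tape pos hd = tape_to_str_alt tape pos hd := by
  obtain ⟨hnd, hne, hcont⟩ := hpre
  have hkeys : (PySem.Dict.mk tape).keys = tape.map Prod.fst := PySem.Dict.keys_mk tape
  have hkne : (PySem.Dict.mk tape).keys ≠ [] := by
    rw [hkeys]; simpa using hne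
  unfold tape_to_str tape_to_str_alt
  rcases hmn : PySem.List.min? (PySem.Dict.mk tape).keys (fun y => y) with _ | mn
  · exact absurd ((PySem.List.min?_eq_none_iff _ _).1 hmn) hkne
  rcases hmx : PySem.List.max? (PySem.Dict.mk tape).keys (fun y => y) with _ | mx
  · exact absurd ((PySem.List.max?_eq_none_iff _ _).1 hmx) hkne
  simp only []
  rw [pv_fold (PySem.Dict.mk tape) pos hd, List.nil_append,
      pv_cells tape mn mx hnd hcont hmn hmx]
  have hmnmx : mn ≤ mx := by
    have := PySem.List.min?_isMin hmn mx (PySem.List.max?_mem hmx)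
    simpa using this
  have hmaplen : ((PySem.List.pyRange mn (mx + 1) 1).map
      (fun i => some (pvCell (PySem.Dict.mk tape) i))).length = (mx + 1 - mn).toNat := by
    simp [PySem.List.length_pyRange_one]
  have hjoin : ((PySem.List.pyRange mn (mx + 1) 1).map
      (fun i => some (pvCell (PySem.Dict.mk tape) i))).map (fun c => c.getD '?') =
      (PySem.List.pyRange mn (mx + 1) 1).map (pvCell (PySem.Dict.mk tape)) := by
    rw [List.map_map]; rfl
  by_cases hgt : hd = ">"
  · rw [if_pos hgt]
    by_cases hin : mn ≤ pos ∧ pos ≤ mx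
    · rw [if_pos (by omega : 0 ≤ pos - mn ∧ pos - mn < mx - mn + 1)]
      have hcast : pos - mn = (((pos - mn).toNat : Nat) : Int) := by omega
      rw [hcast, PySem.List.insert_natCast _ _ _ (by rw [hmaplen]; omega)]
      rw [List.map_append, List.map_cons, List.map_take, List.map_drop, hjoin]
      rw [pv_take _ pos mn mx hin.1 (by omega), pv_drop _ pos mn mx hin.1 (by omega)]
      rw [pv_split _ pos mn mx hd hin.1 hin.2]
      rw [PySem.List.pyRange_one_cons (by omega : pos < mx + 1)]
      simp [pvG, hgt]
    · rw [if_neg (by omega), hjoin]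
      rw [pv_flat_plain _ pos hd _ (fun i hi hip => by
            have := (PySem.List.mem_pyRange_one).1 hi
            exact absurd ⟨by omega, by omega⟩ hin)]
  · rw [if_neg hgt]
    by_cases hlt : hd = "<"
    · rw [if_pos hlt]
      by_cases hin : mn ≤ pos ∧ pos ≤ mx
      · rw [if_pos (by omega : 0 ≤ pos - mn ∧ pos - mn < mx - mn + 1)]
        have hcast : pos - mn + 1 = (((pos + 1 - mn).toNat : Nat) : Int) := by omega
        rw [hcast, PySem.List.insert_natCast _ _ _ (by rw [hmaplen]; omega)]
        rw [List.map_append, List.map_cons, List.map_take, List.map_drop, hjoin]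
        rw [pv_take _ (pos + 1) mn mx (by omega) (by omega),
            pv_drop _ (pos + 1) mn mx (by omega) (by omega)]
        rw [pv_split _ pos mn mx hd hin.1 hin.2]
        rw [PySem.List.pyRange_one_succ_right hin.1]
        simp [pvG, hlt]
      · rw [if_neg (by omega), hjoin]
        rw [pv_flat_plain _ pos hd _ (fun i hi hip => by
              have := (PySem.List.mem_pyRange_one).1 hi
              exact absurd ⟨by omega, by omega⟩ hin)]
    · rw [if_neg hlt, hjoin]
      rw [pv_flat_plain _ pos hd _ (fun i _ _ => ⟨hgt, hlt⟩)]

-- ===== VERDICT (by name: the statements are the Claim_ definitions above) =====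
theorem tape_to_str_spec : Claim_equal_tape_to_str := by
  intro tape pos tape_head _ hpre
  unfold Spec_tape_to_str
  exact pv_equal tape pos tape_head hpre
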